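-- pv_equiv track=rewrite | github.com/pfeuh/atariCreditsRoller | tools/memory.py | getBitmap
-- ===== SOURCE A (Python) =====
-- ZERO = ' '
--
-- ONE = 'X'
--
-- def getBitmap(byte):
--     text = " // "
--     for cpt in range(8):
--         if byte & 0x80:
--             text += ONE
--         else:
--             text += ZERO
--         byte <<= 1
--     return text
-- ===== SOURCE B (Python) =====
-- ZERO = ' '
-- ONE = 'X'
--
-- _TRANS = str.maketrans('01', ZERO + ONE)
--
-- def getBitmap(byte):
--     return " // " + format(byte & 0xFF, '08b').translate(_TRANS)
-- ===== Notes on version B (the rewrite author's own statement) =====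
-- stated objective: idiomatic
-- what changed: Replaces the shift-and-branch loop over a mutated byte with a zero-padded binary string format of the masked byte followed by a character translation of zero/one digits to the blank and cross glyphs.
import Mathlib
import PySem

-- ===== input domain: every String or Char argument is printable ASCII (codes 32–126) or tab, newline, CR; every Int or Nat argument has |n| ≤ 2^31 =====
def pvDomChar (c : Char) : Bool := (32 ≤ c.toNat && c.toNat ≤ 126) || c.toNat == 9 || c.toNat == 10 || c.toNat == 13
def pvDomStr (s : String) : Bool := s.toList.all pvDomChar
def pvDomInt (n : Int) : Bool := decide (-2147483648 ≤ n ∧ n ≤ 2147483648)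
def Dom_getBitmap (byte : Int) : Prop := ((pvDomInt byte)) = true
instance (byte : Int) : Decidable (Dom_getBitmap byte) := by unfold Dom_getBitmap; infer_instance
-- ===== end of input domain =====

-- B replaces A's shift-and-branch loop by formatting the masked byte in binary and translating '0'/'1' to ' '/'X' (idiomatic; same cost).

-- ===== PORT A =====
-- ZERO = ' ', ONE = 'X'; loop state is (text, byte), byte shifted left each step; 'byte & 0x80' truthy iff ≠ 0
def getBitmap (byte : Int) : String :=
  (((List.range 8).foldl
      (fun (st : String × Int) _ =>
        (st.1 ++ (if PySem.Int.band st.2 0x80 ≠ 0 then "X" else " "), st.2 <<< (1:Nat)))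
      (" // ", byte))).1

-- ===== PORT B =====
-- format(byte & 0xFF, '08b') = PySem.Int.toBinChars left-padded with '0' to width 8; translate maps '0'→' ', '1'→'X' (other chars unchanged)
def getBitmap_alt (byte : Int) : String :=
  let s := PySem.Int.toBinChars (PySem.Int.band byte 0xFF)
  let padded := List.replicate (8 - s.length) '0' ++ s
  String.ofList (" // ".toList ++ padded.map (fun c => if c = '0' then ' ' else if c = '1' then 'X' else c))

-- ===== PRECONDITION & SPEC =====
def Spec_getBitmap (byte : Int) (out : String) : Prop := out = getBitmap_alt byte
instance (byte : Int) (out : String) : Decidable (Spec_getBitmap byte out) := by unfold Spec_getBitmap; infer_instance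

-- ===== CLAIM (what is proved, stated in full; the proofs are below) =====
def Claim_equal_getBitmap : Prop := ∀ (byte : Int), Dom_getBitmap byte → Spec_getBitmap byte (getBitmap byte)

-- ===== LEMMAS AND PROOFS =====

-- x & 128 reads bit 7, which is determined by x mod 256 (Python-exact also for negative x)
theorem band128_eq (x : Int) : PySem.Int.band x 128 = (if x % 256 < 128 then (0 : Int) else 128) := by
  unfold PySem.Int.band
  by_cases hx : 0 ≤ x
  · simp only [hx, show (0:Int) ≤ 128 by norm_num, if_pos]
    have h : x.toNat &&& (128:Int).toNat = (x.toNat.testBit 7).toNat * 2 ^ 7 := Nat.and_two_pow x.toNat 7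
    rw [h]
    have ht : (x.toNat.testBit 7).toNat = x.toNat / 2 ^ 7 % 2 := Nat.toNat_testBit _ _
    rw [ht]; split_ifs <;> push_cast <;> omega
  · simp only [hx, if_false, show (0:Int) ≤ 128 by norm_num, if_pos]
    have h : (128:Int).toNat &&& (-x - 1).toNat = ((-x-1).toNat.testBit 7).toNat * 2 ^ 7 := by
      rw [Nat.and_comm]; exact Nat.and_two_pow _ 7
    rw [h]
    have ht : ((-x-1).toNat.testBit 7).toNat = (-x-1).toNat / 2 ^ 7 % 2 := Nat.toNat_testBit _ _
    rw [ht]; split_ifs <;> push_cast <;> omega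

-- x & 255 is x mod 256 (Python-exact also for negative x)
theorem band255_eq (x : Int) : PySem.Int.band x 255 = x % 256 := by
  unfold PySem.Int.band
  by_cases hx : 0 ≤ x
  · simp only [hx, show (0:Int) ≤ 255 by norm_num, if_pos]
    have h : x.toNat &&& (255:Int).toNat = x.toNat % 2 ^ 8 := Nat.and_two_pow_sub_one_eq_mod x.toNat 8
    rw [h]; omega
  · simp only [hx, if_false, show (0:Int) ≤ 255 by norm_num, if_pos]
    have h : (255:Int).toNat &&& (-x - 1).toNat = (-x-1).toNat % 2 ^ 8 := by
      rw [Nat.and_comm]; exact Nat.and_two_pow_sub_one_eq_mod _ 8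
    rw [h]; omega

-- A's loop only ever reads the state byte modulo 256
theorem loop_congr (l : List Nat) : ∀ (t : String) (a b : Int), a % 256 = b % 256 →
    (l.foldl (fun (st : String × Int) _ =>
        (st.1 ++ (if PySem.Int.band st.2 0x80 ≠ 0 then "X" else " "), st.2 <<< (1:Nat))) (t, a)).1
    = (l.foldl (fun (st : String × Int) _ =>
        (st.1 ++ (if PySem.Int.band st.2 0x80 ≠ 0 then "X" else " "), st.2 <<< (1:Nat))) (t, b)).1 := by
  induction l with
  | nil => intro t a b h; rfl
  | cons x xs ih =>
    intro t a b h
    simp only [List.foldl_cons]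
    have hc : PySem.Int.band a 0x80 = PySem.Int.band b 0x80 := by
      rw [show (0x80 : Int) = 128 from rfl, band128_eq, band128_eq, h]
    rw [hc]
    apply ih
    rw [Int.shiftLeft_eq, Int.shiftLeft_eq]
    omega

-- both sides agree on every residue mod 256
set_option maxRecDepth 10000 in
theorem key : ∀ r : Fin 256, getBitmap ((r : Nat) : Int) = getBitmap_alt ((r : Nat) : Int) := by decide

-- ===== VERDICT (by name: the statement is the Claim_ definition above) =====
theorem getBitmap_spec : Claim_equal_getBitmap := by
  intro byte _
  show getBitmap byte = getBitmap_alt byte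
  have hmm : byte % 256 % 256 = byte % 256 := by omega
  have hA : getBitmap byte = getBitmap (byte % 256) := loop_congr _ _ _ _ hmm.symm
  have hB : getBitmap_alt byte = getBitmap_alt (byte % 256) := by
    unfold getBitmap_alt
    rw [show (0xFF : Int) = 255 from rfl, band255_eq, band255_eq, hmm]
  rw [hA, hB]
  have hcast : byte % 256 = ((byte % 256).toNat : Int) := by omega
  rw [hcast]
  exact key ⟨(byte % 256).toNat, by omega⟩
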